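-- pv_equiv track=rewrite | github.com/aneeshk1412/house-of-algorithms | python/depth_first_search.py | depth_first_search_visit
-- ===== SOURCE A (Python) =====
-- WHITE = 0
--
-- GREY = 1
--
-- BLACK = 2
--
-- def depth_first_search_visit(source, adjacency_list, visited):
--     """Run a depth first search from `source` on a directed graph.
--     """
--     if visited[source] is not WHITE:
--         return 1
--
--     ## Discovered 'source'
--     visited[source] = GREY
--     ## Pre-Compute Here
--     count = 0
--
--     ## Depth First Tree Computations:
--     for node in adjacency_list[source]:
--         ## Computation on each Neighbor Depth First Tree
--         count += depth_first_search_visit(node, adjacency_list, visited)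
--
--     ## Post-Compute Here
--     ## Finished 'source'
--     visited[source] = BLACK
--     ## Return Computation
--     return count
-- ===== SOURCE B (Python) =====
-- WHITE = 0
--
-- GREY = 1
--
-- BLACK = 2
--
-- def depth_first_search_visit(source, adjacency_list, visited):
--     """Iterative DFS with an explicit stack of (node, neighbor-iterator) frames.
--     Same return value and same in-place mutation of `visited` as the recursive version.
--     """
--     if visited[source] is not WHITE:
--         return 1
--     visited[source] = GREY
--     count = 0
--     stack = [(source, iter(adjacency_list[source]))]
--     while stack:
--         u, it = stack[-1]
--         pushed = False
--         for node in it: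
--             if visited[node] is not WHITE:
--                 count += 1
--             else:
--                 visited[node] = GREY
--                 stack.append((node, iter(adjacency_list[node])))
--                 pushed = True
--                 break
--         if not pushed:
--             visited[u] = BLACK
--             stack.pop()
--     return count
-- ===== Notes on version B (the rewrite author's own statement) =====
-- stated objective: alternative
-- what changed: the recursive DFS is replaced by an iterative DFS driven by an explicit stack of (node, remaining-neighbors) frames, so no call recursion is used (and Python's recursion-depth limit is avoided)
import Mathlib
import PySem

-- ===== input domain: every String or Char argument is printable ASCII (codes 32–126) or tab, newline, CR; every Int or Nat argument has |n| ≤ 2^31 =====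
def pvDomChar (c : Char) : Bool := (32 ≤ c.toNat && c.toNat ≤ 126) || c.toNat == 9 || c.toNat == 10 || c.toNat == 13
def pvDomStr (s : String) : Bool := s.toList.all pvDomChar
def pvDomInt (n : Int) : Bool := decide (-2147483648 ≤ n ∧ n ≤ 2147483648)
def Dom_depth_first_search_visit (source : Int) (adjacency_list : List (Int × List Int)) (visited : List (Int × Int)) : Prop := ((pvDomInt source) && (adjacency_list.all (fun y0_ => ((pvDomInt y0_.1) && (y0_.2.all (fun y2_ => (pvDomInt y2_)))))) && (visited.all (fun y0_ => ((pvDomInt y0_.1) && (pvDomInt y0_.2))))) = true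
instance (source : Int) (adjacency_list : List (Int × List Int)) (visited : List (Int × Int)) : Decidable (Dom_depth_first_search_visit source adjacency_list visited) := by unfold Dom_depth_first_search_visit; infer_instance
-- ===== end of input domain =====

-- B is an iterative DFS with an explicit stack instead of A's recursion (objective: alternative decomposition).
-- Both Pythons mutate `visited` in place in the same way; the equivalence proved here is about the RETURN value.

-- ===== PORT A =====
-- number of WHITE (= 0) entries of a visited-dict; used only as fuel for A's recursion
def pvWhite (d : PySem.Dict Int Int) : Nat := List.countP (fun p => p.2 == 0) d.items

-- the recursive function itself, fuelled (pvWhite + 1 fuel always suffices: each recursive descent greys a WHITE node);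
-- `none` marks exactly Python's KeyError points
def pvGoA (A : PySem.Dict Int (List Int)) : Nat → Int → PySem.Dict Int Int → Option (Int × PySem.Dict Int Int)
  | 0, _, _ => none
  | (f+1), s, d =>
    match d.get? s with
    | none => none
    | some v =>
      if v ≠ 0 then some (1, d)
      else
        match A.get? s with
        | none => none
        | some ns =>
          (ns.foldl (fun acc n => acc.bind (fun p => (pvGoA A f n p.2).map (fun q => (p.1 + q.1, q.2))))
              (some ((0:Int), d.insert s 1))).map (fun p => (p.1, p.2.insert s 2))

def depth_first_search_visit (source : Int) (adjacency_list : List (Int × List Int)) (visited : List (Int × Int)) : Int :=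
  let A := PySem.Dict.mk adjacency_list
  let V := PySem.Dict.mk visited
  ((pvGoA A (pvWhite V + 1) source V).map (fun p => p.1)).getD 0

-- ===== PORT B =====
-- the inner `for node in it` loop: count already-seen neighbors until the first WHITE one (returned with the rest
-- of the iterator) or exhaustion; `none` = KeyError
def pvScanB (d : PySem.Dict Int Int) : List Int → Int → Option ((Int × List Int × Int) ⊕ Int)
  | [], c => some (Sum.inr c)
  | n :: ns, c =>
    match d.get? n with
    | none => none
    | some v => if v ≠ 0 then pvScanB d ns (c+1) else some (Sum.inl (n, ns, c))

-- the `while stack` loop; each iteration pushes or pops, so 2·pvWhite + |stack| fuel suffices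
def pvGoB (A : PySem.Dict Int (List Int)) : Nat → List (Int × List Int) → PySem.Dict Int Int → Int → Option Int
  | 0, S, _, c => if S.isEmpty then some c else none
  | f+1, S, d, c =>
    match S with
    | [] => some c
    | (u, ns) :: S' =>
      match pvScanB d ns c with
      | none => none
      | some (Sum.inr c') => pvGoB A f S' (d.insert u 2) c'
      | some (Sum.inl (n, rest, c')) =>
        match A.get? n with
        | none => none
        | some ns2 => pvGoB A f ((n, ns2) :: (u, rest) :: S') (d.insert n 1) c'

def depth_first_search_visit_alt (source : Int) (adjacency_list : List (Int × List Int)) (visited : List (Int × Int)) : Int :=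
  let A := PySem.Dict.mk adjacency_list
  let V := PySem.Dict.mk visited
  match V.get? source with
  | none => 0
  | some v =>
    if v ≠ 0 then 1
    else
      match A.get? source with
      | none => 0
      | some ns => (pvGoB A (2 * pvWhite (V.insert source 1) + 1) [(source, ns)] (V.insert source 1) 0).getD 0

-- ===== PRECONDITION & SPEC =====
-- pvReach computes the set of nodes the search actually expands: the closure of {source} under
-- "WHITE neighbor of an already-reached node" (one closure round per iteration; |visited|+1 rounds
-- reach the fixpoint since every round that changes the set adds a distinct WHITE key of `visited`).
def pvIterReach (adj : PySem.Dict Int (List Int)) (vis : PySem.Dict Int Int) : Nat → List Int → List Int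
  | 0, E => E
  | k+1, E =>
    pvIterReach adj vis k
      (E ++ ((E.flatMap (fun u => adj.getD u [])).filter
               (fun n => vis.get? n == some 0 && !E.contains n)).dedup)

def pvReach (adj : PySem.Dict Int (List Int)) (vis : PySem.Dict Int Int) (source : Int) : List Int :=
  pvIterReach adj vis (vis.items.length + 1) [source]

-- Pre_ excludes exactly the inputs on which the Python A raises KeyError: `source` missing from `visited`,
-- or (when `source` is WHITE) some node reached through WHITE nodes missing from `adjacency_list`, or a
-- neighbor of a reached node missing from `visited`.  On every other input A returns and is matched.
def Pre_depth_first_search_visit (source : Int) (adjacency_list : List (Int × List Int)) (visited : List (Int × Int)) : Prop :=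
  (PySem.Dict.mk visited).contains source = true ∧
  ((PySem.Dict.mk visited).get? source = some 0 →
    ∀ u ∈ pvReach (PySem.Dict.mk adjacency_list) (PySem.Dict.mk visited) source,
      (PySem.Dict.mk adjacency_list).contains u = true ∧
      ∀ n ∈ (PySem.Dict.mk adjacency_list).getD u [], (PySem.Dict.mk visited).contains n = true)
instance (source : Int) (adjacency_list : List (Int × List Int)) (visited : List (Int × Int)) : Decidable (Pre_depth_first_search_visit source adjacency_list visited) := by unfold Pre_depth_first_search_visit; infer_instance

def pvWitness_depth_first_search_visit : Int × (List (Int × List Int)) × (List (Int × Int)) :=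
  (0, [(0, [1, 2]), (1, [0]), (2, [])], [(0, 0), (1, 0), (2, 1)])

def Spec_depth_first_search_visit (source : Int) (adjacency_list : List (Int × List Int)) (visited : List (Int × Int)) (out : Int) : Prop := out = depth_first_search_visit_alt source adjacency_list visited
instance (source : Int) (adjacency_list : List (Int × List Int)) (visited : List (Int × Int)) (out : Int) : Decidable (Spec_depth_first_search_visit source adjacency_list visited out) := by unfold Spec_depth_first_search_visit; infer_instance

-- ===== CLAIM (what is proved, stated in full; the proofs are below) =====
def Claim_equal_depth_first_search_visit : Prop := ∀ (source : Int) (adjacency_list : List (Int × List Int)) (visited : List (Int × Int)), Dom_depth_first_search_visit source adjacency_list visited → Pre_depth_first_search_visit source adjacency_list visited → Spec_depth_first_search_visit source adjacency_list visited (depth_first_search_visit source adjacency_list visited)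

-- ===== LEMMAS AND PROOFS =====

-- A's neighbor loop as a named function (definitionally the foldl inside pvGoA)
def pvGoListA (A : PySem.Dict Int (List Int)) (f : Nat) (ns : List Int) (d : PySem.Dict Int Int) (c : Int) : Option (Int × PySem.Dict Int Int) :=
  ns.foldl (fun acc n => acc.bind (fun p => (pvGoA A f n p.2).map (fun q => (p.1 + q.1, q.2)))) (some (c, d))

theorem pvCountP_lt {α : Type} (p q : α → Bool) : ∀ l : List α, (∀ a ∈ l, q a → p a) →
    ∀ a ∈ l, p a = true → q a = false → l.countP q < l.countP p := by
  intro l hmono a ha hp hq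
  induction l with
  | nil => cases ha
  | cons b l ih =>
    simp only [List.countP_cons]
    rcases List.mem_cons.1 ha with rfl | ha'
    · have h1 : l.countP q ≤ l.countP p :=
        List.countP_mono_left (fun x hx => hmono x (List.mem_cons_of_mem _ hx))
      simp [hp, hq]; omega
    · have := ih (fun x hx => hmono x (List.mem_cons_of_mem _ hx)) ha'
      have h2 : (if q b then 1 else 0) ≤ (if p b then 1 else 0) := by
        by_cases hb : q b
        · simp [hb, hmono b (List.mem_cons_self) hb]
        · simp [hb]
      omega

theorem pvWhite_insert_le (d : PySem.Dict Int Int) (k v : Int) (hv : v ≠ 0) :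
    pvWhite (d.insert k v) ≤ pvWhite d := by
  unfold pvWhite
  rw [PySem.Dict.items_insert]
  split
  · rw [List.countP_map]
    apply List.countP_mono_left
    intro a _ h
    by_cases hk : a.1 == k
    · simp [Function.comp, hk, hv] at h
    · simpa [Function.comp, hk] using h
  · simp [List.countP_append, hv]

theorem pvWhite_insert_lt (d : PySem.Dict Int Int) (k : Int) (h : d.get? k = some 0) :
    pvWhite (d.insert k 1) < pvWhite d := by
  have hmem : (k, (0:Int)) ∈ d.items := PySem.Dict.mem_items_of_get?_eq_some d h
  have hc : d.contains k = true := by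
    rw [PySem.Dict.contains_eq_isSome_get?, h]; rfl
  unfold pvWhite
  rw [PySem.Dict.items_insert, if_pos hc, List.countP_map]
  apply pvCountP_lt
  · intro a _ hq
    by_cases hk : a.1 == k
    · simp [Function.comp, hk] at hq
    · simpa [Function.comp, hk] using hq
  · exact hmem
  · rfl
  · simp [Function.comp]

theorem pvFold_none (A : PySem.Dict Int (List Int)) (f : Nat) (ns : List Int) :
    ns.foldl (fun acc n => acc.bind (fun p => (pvGoA A f n p.2).map (fun q => (p.1 + q.1, q.2)))) none = none := by
  induction ns with
  | nil => rfl
  | cons n ns ih => simpa using ih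

theorem pvGoListA_nil (A : PySem.Dict Int (List Int)) (f : Nat) (d : PySem.Dict Int Int) (c : Int) :
    pvGoListA A f [] d c = some (c, d) := rfl

theorem pvGoListA_cons (A : PySem.Dict Int (List Int)) (f : Nat) (n : Int) (ns : List Int) (d : PySem.Dict Int Int) (c : Int) :
    pvGoListA A f (n :: ns) d c =
      match pvGoA A f n d with
      | none => none
      | some q => pvGoListA A f ns q.2 (c + q.1) := by
  unfold pvGoListA
  rw [List.foldl_cons]
  cases hg : pvGoA A f n d with
  | none => simp [hg, pvFold_none]
  | some q => simp [hg]

theorem pvGoListA_shift (A : PySem.Dict Int (List Int)) (f : Nat) (ns : List Int) :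
    ∀ (d : PySem.Dict Int Int) (c : Int),
    pvGoListA A f ns d c = (pvGoListA A f ns d 0).map (fun p => (c + p.1, p.2)) := by
  induction ns with
  | nil => intro d c; simp [pvGoListA]
  | cons n ns ih =>
    intro d c
    rw [pvGoListA_cons, pvGoListA_cons]
    cases hg : pvGoA A f n d with
    | none => rfl
    | some q =>
      simp only []
      rw [ih q.2 (c + q.1), ih q.2 (0 + q.1)]
      cases h2 : pvGoListA A f ns q.2 0 with
      | none => rfl
      | some p => simp; ring

theorem pvGoA_succ (A : PySem.Dict Int (List Int)) (f : Nat) (s : Int) (d : PySem.Dict Int Int) :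
    pvGoA A (f+1) s d =
      match d.get? s with
      | none => none
      | some v =>
        if v ≠ 0 then some (1, d)
        else
          match A.get? s with
          | none => none
          | some ns => (pvGoListA A f ns (d.insert s 1) 0).map (fun p => (p.1, p.2.insert s 2)) := rfl

theorem pvW (A : PySem.Dict Int (List Int)) : ∀ f : Nat,
    (∀ s d c' d', pvGoA A f s d = some (c', d') → pvWhite d' ≤ pvWhite d) ∧
    (∀ ns d c c' d', pvGoListA A f ns d c = some (c', d') → pvWhite d' ≤ pvWhite d) := by
  intro f
  induction f using Nat.strong_induction_on with
  | _ f ih =>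
  have hA : ∀ s d c' d', pvGoA A f s d = some (c', d') → pvWhite d' ≤ pvWhite d := by
    match f with
    | 0 => intro s d c' d' h; simp [pvGoA] at h
    | g+1 =>
      intro s d c' d' h
      rw [pvGoA_succ] at h
      cases hg : d.get? s with
      | none => rw [hg] at h; simp at h
      | some v =>
        rw [hg] at h; dsimp only at h
        by_cases hv : v = 0
        · subst hv
          simp only [ne_eq, not_true_eq_false, if_false] at h
          cases ha : A.get? s with
          | none => rw [ha] at h; simp at h
          | some ns =>
            rw [ha] at h; dsimp only at h
            cases hL : pvGoListA A g ns (d.insert s 1) 0 with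
            | none => rw [hL] at h; simp at h
            | some p =>
              rw [hL] at h
              simp only [Option.map_some, Option.some.injEq, Prod.mk.injEq] at h
              have h1 : pvWhite p.2 ≤ pvWhite (d.insert s 1) :=
                (ih g (Nat.lt_succ_self g)).2 ns _ 0 p.1 p.2 hL
              have h2 : pvWhite (d.insert s 1) < pvWhite d := pvWhite_insert_lt d s hg
              have h3 : pvWhite (p.2.insert s 2) ≤ pvWhite p.2 := pvWhite_insert_le p.2 s 2 (by decide)
              obtain ⟨-, h2'⟩ := h
              subst h2'
              omega
        · rw [if_pos hv] at h
          cases h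
          exact Nat.le_refl _
  refine ⟨hA, ?_⟩
  intro ns
  induction ns with
  | nil =>
    intro d c c' d' h
    rw [pvGoListA_nil] at h
    cases h; exact Nat.le_refl _
  | cons n ns ihl =>
    intro d c c' d' h
    rw [pvGoListA_cons] at h
    cases hg : pvGoA A f n d with
    | none => rw [hg] at h; simp at h
    | some q =>
      rw [hg] at h
      exact Nat.le_trans (ihl q.2 (c + q.1) c' d' h) (hA n d q.1 q.2 hg)

theorem pvC (A : PySem.Dict Int (List Int)) : ∀ f : Nat,
    (∀ s d, pvWhite d < f → pvGoA A f s d = pvGoA A (pvWhite d + 1) s d) ∧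
    (∀ ns d c, pvWhite d < f → pvGoListA A f ns d c = pvGoListA A (pvWhite d + 1) ns d c) := by
  intro f
  induction f using Nat.strong_induction_on with
  | _ f ih =>
  have hA : ∀ s d, pvWhite d < f → pvGoA A f s d = pvGoA A (pvWhite d + 1) s d := by
    match f with
    | 0 => intro s d h; omega
    | g+1 =>
      intro s d hlt
      rw [pvGoA_succ, pvGoA_succ]
      cases hg : d.get? s with
      | none => rfl
      | some v =>
        dsimp only
        by_cases hv : v = 0
        · subst hv
          simp only [ne_eq, not_true_eq_false, if_false]
          cases ha : A.get? s with
          | none => rfl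
          | some ns =>
            have h2 : pvWhite (d.insert s 1) < pvWhite d := pvWhite_insert_lt d s hg
            dsimp only
            rw [(ih g (Nat.lt_succ_self g)).2 ns (d.insert s 1) 0 (by omega),
                (ih (pvWhite d) (by omega)).2 ns (d.insert s 1) 0 (by omega)]
        · rw [if_pos hv, if_pos hv]
  refine ⟨hA, ?_⟩
  intro ns
  induction ns with
  | nil => intro d c h; rw [pvGoListA_nil, pvGoListA_nil]
  | cons n ns ihl =>
    intro d c hlt
    rw [pvGoListA_cons, pvGoListA_cons, ← hA n d hlt]
    cases hg : pvGoA A f n d with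
    | none => rfl
    | some q =>
      simp only []
      have hq : pvWhite q.2 ≤ pvWhite d := (pvW A f).1 n d q.1 q.2 hg
      rw [ihl q.2 (c + q.1) (by omega)]
      by_cases hwf : pvWhite d + 1 = f
      · subst hwf
        rw [ihl q.2 (c + q.1) (by omega)]
      · rw [(ih (pvWhite d + 1) (by omega)).2 ns q.2 (c + q.1) (by omega)]

def pvEval (A : PySem.Dict Int (List Int)) : List (Int × List Int) → PySem.Dict Int Int → Int → Option Int
  | [], _, c => some c
  | (u, ns) :: S, d, c =>
    match pvGoListA A (pvWhite d + 1) ns d c with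
    | none => none
    | some p => pvEval A S (p.2.insert u 2) p.1

theorem pvScanB_inl (d : PySem.Dict Int Int) : ∀ (ns : List Int) (c : Int) (n : Int) (rest : List Int) (c' : Int),
    pvScanB d ns c = some (Sum.inl (n, rest, c')) → d.get? n = some 0 := by
  intro ns
  induction ns with
  | nil => intro c n rest c' h; simp [pvScanB] at h
  | cons m ns ih =>
    intro c n rest c' h
    unfold pvScanB at h
    cases hm : d.get? m with
    | none => rw [hm] at h; simp at h
    | some v =>
      rw [hm] at h; dsimp only at h
      by_cases hv : v = 0
      · subst hv
        simp only [ne_eq, not_true_eq_false, if_false, Option.some.injEq, Sum.inl.injEq] at h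
        obtain ⟨rfl, -, -⟩ := h
        exact hm
      · rw [if_pos hv] at h
        exact ih (c+1) n rest c' h

theorem pvScan_spec (A : PySem.Dict Int (List Int)) (d : PySem.Dict Int Int) : ∀ (ns : List Int) (c : Int),
    pvGoListA A (pvWhite d + 1) ns d c =
      match pvScanB d ns c with
      | none => none
      | some (Sum.inr c') => some (c', d)
      | some (Sum.inl (n, rest, c')) =>
        match A.get? n with
        | none => none
        | some ns2 =>
          match pvGoListA A (pvWhite (d.insert n 1) + 1) ns2 (d.insert n 1) 0 with
          | none => none
          | some p => pvGoListA A (pvWhite (p.2.insert n 2) + 1) rest (p.2.insert n 2) (c' + p.1) := by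
  intro ns
  induction ns with
  | nil => intro c; rfl
  | cons n ns ih =>
    intro c
    rw [pvGoListA_cons, pvGoA_succ]
    unfold pvScanB
    cases hn : d.get? n with
    | none => rfl
    | some v =>
      dsimp only
      by_cases hv : v = 0
      · subst hv
        simp only [ne_eq, not_true_eq_false, if_false]
        cases ha : A.get? n with
        | none => rfl
        | some ns2 =>
          dsimp only
          have h2 : pvWhite (d.insert n 1) < pvWhite d := pvWhite_insert_lt d n hn
          rw [(pvC A (pvWhite d)).2 ns2 (d.insert n 1) 0 (by omega)]
          cases hp : pvGoListA A (pvWhite (d.insert n 1) + 1) ns2 (d.insert n 1) 0 with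
          | none => rfl
          | some p =>
            simp only [Option.map_some]
            have hple : pvWhite p.2 ≤ pvWhite (d.insert n 1) :=
              (pvW A (pvWhite (d.insert n 1) + 1)).2 ns2 _ 0 p.1 p.2 hp
            have hble : pvWhite (p.2.insert n 2) ≤ pvWhite p.2 := pvWhite_insert_le p.2 n 2 (by decide)
            rw [pvGoListA_shift A (pvWhite d + 1) ns (p.2.insert n 2) (c + p.1),
                (pvC A (pvWhite d + 1)).2 ns (p.2.insert n 2) 0 (by omega),
                ← pvGoListA_shift A (pvWhite (p.2.insert n 2) + 1) ns (p.2.insert n 2) (c + p.1)]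
      · rw [if_pos hv, if_pos hv]
        exact ih (c + 1)

theorem pvEval_cons (A : PySem.Dict Int (List Int)) (u : Int) (ns : List Int) (S : List (Int × List Int)) (d : PySem.Dict Int Int) (c : Int) :
    pvEval A ((u, ns) :: S) d c =
      match pvGoListA A (pvWhite d + 1) ns d c with
      | none => none
      | some p => pvEval A S (p.2.insert u 2) p.1 := rfl

theorem pvSIM (A : PySem.Dict Int (List Int)) : ∀ (f : Nat) (S : List (Int × List Int)) (d : PySem.Dict Int Int) (c : Int),
    2 * pvWhite d + S.length ≤ f → pvGoB A f S d c = pvEval A S d c := by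
  intro f
  induction f using Nat.strong_induction_on with
  | _ f ih =>
  intro S d c hf
  cases S with
  | nil => cases f <;> rfl
  | cons us S' =>
    obtain ⟨u, ns⟩ := us
    match f, hf with
    | g+1, hf =>
    show (match pvScanB d ns c with
      | none => none
      | some (Sum.inr c') => pvGoB A g S' (d.insert u 2) c'
      | some (Sum.inl (n, rest, c')) =>
        match A.get? n with
        | none => none
        | some ns2 => pvGoB A g ((n, ns2) :: (u, rest) :: S') (d.insert n 1) c') = _
    rw [pvEval_cons, pvScan_spec A d ns c]
    cases hs : pvScanB d ns c with
    | none => rfl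
    | some r =>
      cases r with
      | inr c' =>
        dsimp only
        have hle : pvWhite (d.insert u 2) ≤ pvWhite d := pvWhite_insert_le d u 2 (by decide)
        rw [ih g (by omega) S' (d.insert u 2) c' (by simp at hf ⊢; omega)]
      | inl t =>
        obtain ⟨n, rest, c'⟩ := t
        dsimp only
        have hn : d.get? n = some 0 := pvScanB_inl d ns c n rest c' hs
        have hlt : pvWhite (d.insert n 1) < pvWhite d := pvWhite_insert_lt d n hn
        cases ha : A.get? n with
        | none => rfl
        | some ns2 =>
          dsimp only
          rw [ih g (by omega) ((n, ns2) :: (u, rest) :: S') (d.insert n 1) c' (by simp at hf ⊢; omega),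
              pvEval_cons,
              pvGoListA_shift A (pvWhite (d.insert n 1) + 1) ns2 (d.insert n 1) c']
          cases hp : pvGoListA A (pvWhite (d.insert n 1) + 1) ns2 (d.insert n 1) 0 with
          | none => rfl
          | some p =>
            simp only [Option.map_some]
            rw [pvEval_cons]

-- ===== VERDICT (by name: the statement is the Claim_ definition above) =====
theorem depth_first_search_visit_spec : Claim_equal_depth_first_search_visit := by
  intro s adj vis _ _
  unfold Spec_depth_first_search_visit
  simp only [depth_first_search_visit, depth_first_search_visit_alt]
  cases hv : (PySem.Dict.mk vis).get? s with
  | none => rw [pvGoA_succ, hv]; rfl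
  | some v =>
    rw [pvGoA_succ, hv]
    dsimp only
    by_cases hv0 : v = 0
    · subst hv0
      simp only [ne_eq, not_true_eq_false, if_false]
      cases ha : (PySem.Dict.mk adj).get? s with
      | none => rfl
      | some ns =>
        dsimp only
        have hlt : pvWhite ((PySem.Dict.mk vis).insert s 1) < pvWhite (PySem.Dict.mk vis) :=
          pvWhite_insert_lt _ s hv
        rw [(pvC (PySem.Dict.mk adj) (pvWhite (PySem.Dict.mk vis))).2 ns ((PySem.Dict.mk vis).insert s 1) 0 (by omega),
            pvSIM (PySem.Dict.mk adj) (2 * pvWhite ((PySem.Dict.mk vis).insert s 1) + 1) [(s, ns)] ((PySem.Dict.mk vis).insert s 1) 0 (by simp),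
            pvEval_cons]
        cases hp : pvGoListA (PySem.Dict.mk adj) (pvWhite ((PySem.Dict.mk vis).insert s 1) + 1) ns ((PySem.Dict.mk vis).insert s 1) 0 with
        | none => rfl
        | some p => rfl
    · rw [if_pos hv0, if_pos hv0]
      rfl
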